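-- pv_equiv track=rewrite | github.com/pvtitor/Thesis-Tsinghua | feature_extraction.py | get_dico_of_tags
-- ===== SOURCE A (Python) =====
-- def get_dico_of_tags(tags_1, tags_2):
--     dico = {}
--     tag_count =  0
--
--     for tag in tags_1:
--         # Store the tags of tags_1 in the dictionnary
--         if not(tag in dico.keys()):
--             dico[tag] = tag_count
--             tag_count = tag_count + 1
--
--     for tag in tags_2:
--         # Store the tags of tags_2 in the dictionnary
--         if not(tag in dico.keys()):
--             dico[tag] = tag_count
--             tag_count += 1
--     return dico
-- ===== SOURCE B (Python) =====
-- def get_dico_of_tags(tags_1, tags_2):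
--     # id of a tag = number of distinct tags strictly before its first occurrence
--     seq = list(tags_1) + list(tags_2)
--     return {t: len(set(seq[:seq.index(t)])) for t in seq}
-- ===== Notes on version B (the rewrite author's own statement) =====
-- stated objective: alternative
-- what changed: Replaces A's stateful scan (running counter + membership check) by a stateless closed-form rule applied per element: a tag's id is the number of distinct tags strictly before its first occurrence, computed as len(set(seq[:seq.index(t)])) inside a dict comprehension over the concatenation.
import Mathlib
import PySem

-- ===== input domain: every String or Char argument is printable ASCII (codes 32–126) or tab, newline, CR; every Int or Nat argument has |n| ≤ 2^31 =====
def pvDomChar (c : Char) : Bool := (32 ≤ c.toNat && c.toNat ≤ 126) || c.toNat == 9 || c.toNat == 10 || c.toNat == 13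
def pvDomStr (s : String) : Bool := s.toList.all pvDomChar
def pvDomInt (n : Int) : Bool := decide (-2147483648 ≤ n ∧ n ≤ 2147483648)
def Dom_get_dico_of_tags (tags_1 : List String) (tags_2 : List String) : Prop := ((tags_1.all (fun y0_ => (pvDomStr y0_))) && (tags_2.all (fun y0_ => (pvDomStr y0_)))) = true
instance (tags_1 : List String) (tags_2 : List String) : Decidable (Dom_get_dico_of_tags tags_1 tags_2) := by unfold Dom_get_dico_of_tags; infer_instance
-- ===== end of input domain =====

-- B drops A's running counter + membership-check scan: each tag's id is computed by the
-- stateless closed-form rule "number of distinct tags before its first occurrence"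
-- applied per element in a dict comprehension (alternative algorithm; B is quadratic, not faster).


-- ===== PORT A =====
-- loop body: if not(tag in dico.keys()): dico[tag] = tag_count; tag_count += 1
def pvAStep (st : PySem.Dict String Int × Int) (tag : String) : PySem.Dict String Int × Int :=
  if (PySem.Dict.keys st.1).contains tag then st
  else (st.1.insert tag st.2, st.2 + 1)

def get_dico_of_tags (tags_1 : List String) (tags_2 : List String) : List (String × Int) :=
  let st1 := tags_1.foldl pvAStep (PySem.Dict.empty, 0)
  let st2 := tags_2.foldl pvAStep st1
  st2.1.items

-- ===== PORT B =====
-- len(set(seq[:seq.index(t)])) — seq.index(t) cannot raise (t is drawn from seq), so the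
-- Option from index? is discharged with getD 0 (the none branch is unreachable)
def pvBVal (seq : List String) (t : String) : Int :=
  ((PySem.Set.ofList (PySem.List.slice seq none (some (((PySem.List.index? seq t).getD 0 : Nat) : Int)))).length : Int)

-- {t: len(set(seq[:seq.index(t)])) for t in seq}  over  seq = list(tags_1) + list(tags_2)
def get_dico_of_tags_alt (tags_1 : List String) (tags_2 : List String) : List (String × Int) :=
  let seq := tags_1 ++ tags_2
  (seq.foldl (fun d t => d.insert t (pvBVal seq t)) PySem.Dict.empty).items

-- ===== PRECONDITION & SPEC =====
def Spec_get_dico_of_tags (tags_1 : List String) (tags_2 : List String) (out : List (String × Int)) : Prop := out = get_dico_of_tags_alt tags_1 tags_2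
instance (tags_1 : List String) (tags_2 : List String) (out : List (String × Int)) : Decidable (Spec_get_dico_of_tags tags_1 tags_2 out) := by unfold Spec_get_dico_of_tags; infer_instance

-- ===== CLAIM (what is proved, stated in full; the proofs are below) =====
def Claim_equal_get_dico_of_tags : Prop := ∀ (tags_1 : List String) (tags_2 : List String), Dom_get_dico_of_tags tags_1 tags_2 → Spec_get_dico_of_tags tags_1 tags_2 (get_dico_of_tags tags_1 tags_2)

-- ===== LEMMAS AND PROOFS =====

-- proof-only helper: the pairs (x, id) a dedup list yields, ids starting at n
def pvTagged : List String → Int → List (String × Int)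
  | [], _ => []
  | x :: xs, n => (x, n) :: pvTagged xs (n + 1)

theorem pvTagged_append (l1 l2 : List String) (n : Int) :
    pvTagged (l1 ++ l2) n = pvTagged l1 n ++ pvTagged l2 (n + l1.length) := by
  induction l1 generalizing n with
  | nil => simp [pvTagged]
  | cons x xs ih =>
    simp [pvTagged, ih]
    ring_nf

theorem pvMap_fst_tagged (l : List String) (n : Int) :
    (pvTagged l n).map (·.1) = l := by
  induction l generalizing n with
  | nil => simp [pvTagged]
  | cons x xs ih => simp [pvTagged, ih]

-- ---- A-side characterisation: A's loop builds the tagged first-occurrence dedup ----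
theorem pvAStep_eq (ds : PySem.Set String) (x : String) :
    pvAStep (PySem.Dict.mk (pvTagged ds 0), (ds.length : Int)) x
      = (PySem.Dict.mk (pvTagged (PySem.Set.add ds x) 0), ((PySem.Set.add ds x).length : Int)) := by
  by_cases hx : x ∈ ds
  · have : (PySem.Dict.keys (PySem.Dict.mk (pvTagged ds 0))).contains x = true := by
      simp [PySem.Dict.keys, pvMap_fst_tagged, hx]
    simp only [pvAStep, this, if_true, PySem.Set.add_of_mem hx]
  · have hk : (PySem.Dict.keys (PySem.Dict.mk (pvTagged ds 0))).contains x = false := by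
      simp [PySem.Dict.keys, pvMap_fst_tagged, hx]
    have hc : (PySem.Dict.mk (pvTagged ds 0)).contains x = false := by
      rw [PySem.Dict.contains_eq_decide_mem_keys]
      simp [PySem.Dict.keys, pvMap_fst_tagged, hx]
    simp only [pvAStep, hk, Bool.false_eq_true, if_false]
    rw [PySem.Set.add_of_not_mem hx, Prod.mk.injEq]
    constructor
    · apply PySem.Dict.ext
      rw [PySem.Dict.items_insert, hc]
      simp [pvTagged_append, pvTagged]
    · simp

theorem pvAInvariant (xs : List String) (ds : PySem.Set String) :
    xs.foldl pvAStep (PySem.Dict.mk (pvTagged ds 0), (ds.length : Int))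
      = (PySem.Dict.mk (pvTagged (xs.foldl PySem.Set.add ds) 0),
         ((xs.foldl PySem.Set.add ds).length : Int)) := by
  induction xs generalizing ds with
  | nil => rfl
  | cons x rest ih =>
    simp only [List.foldl_cons, pvAStep_eq]
    exact ih (PySem.Set.add ds x)

-- ---- B-side lemmas ----

-- keys of pvTagged are the underlying list, so no pair of pvTagged has fst = t when t ∉ ds
theorem pvReplace_not_mem (ds : List String) (n v : Int) (t : String) (ht : t ∉ ds) :
    (pvTagged ds n).map (fun q => if q.1 == t then (t, v) else q) = pvTagged ds n := by
  induction ds generalizing n with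
  | nil => simp [pvTagged]
  | cons x xs ih =>
    have hxt : x ≠ t := by rintro rfl; exact ht (List.mem_cons_self ..)
    simp only [pvTagged, List.map_cons]
    exact congrArg₂ List.cons (by simp [hxt])
      (ih (n + 1) (fun h => ht (List.mem_cons_of_mem _ h)))

-- overwriting the pair already stored for t changes nothing
theorem pvReplace_mem (ds : List String) (n v : Int) (t : String) (hnd : ds.Nodup)
    (hmem : (t, v) ∈ pvTagged ds n) :
    (pvTagged ds n).map (fun q => if q.1 == t then (t, v) else q) = pvTagged ds n := by
  induction ds generalizing n with
  | nil => simp [pvTagged] at hmem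
  | cons x xs ih =>
    simp only [pvTagged, List.mem_cons] at hmem
    rcases hmem with h | h
    · obtain ⟨rfl, rfl⟩ := Prod.mk.inj h
      simp only [pvTagged, List.map_cons]
      exact congrArg₂ List.cons (by simp)
        (pvReplace_not_mem _ _ _ _ (List.nodup_cons.mp hnd).1)
    · have htx : t ∈ xs := by
        have hfst := pvMap_fst_tagged xs (n + 1)
        exact hfst ▸ List.mem_map_of_mem h
      have hxt : x ≠ t := fun he => (List.nodup_cons.mp hnd).1 (he ▸ htx)
      simp only [pvTagged, List.map_cons]
      exact congrArg₂ List.cons (by simp [hxt])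
        (ih (n + 1) (List.nodup_cons.mp hnd).2 h)

-- the closed-form value of t (distinct count of the prefix before t's first occurrence)
-- is exactly the id paired with t in the tagged dedup of p
theorem pvVal_mem_tagged (p : List String) (t : String) (k : Nat)
    (h : PySem.List.index? p t = some k) :
    (t, ((PySem.Set.ofList (p.take k)).length : Int)) ∈ pvTagged (PySem.Set.ofList p) 0 := by
  induction p using List.reverseRecOn with
  | nil => simp [PySem.List.index?_eq_idxOf?] at h
  | append_singleton p y ih =>
    by_cases hp : t ∈ p
    · rw [PySem.List.index?_append_of_mem [y] hp] at h
      obtain ⟨hk, -, -⟩ := PySem.List.getElem_of_index?_eq_some h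
      have htake : (p ++ [y]).take k = p.take k := by
        rw [List.take_append_of_le_length (le_of_lt hk)]
      rw [htake, PySem.Set.ofList_append_singleton]
      by_cases hy : y ∈ PySem.Set.ofList p
      · rw [PySem.Set.add_of_mem hy]; exact ih h
      · rw [PySem.Set.add_of_not_mem hy, pvTagged_append]
        exact List.mem_append_left _ (ih h)
    · have hty : t = y := by
        have hm : t ∈ p ++ [y] := (PySem.List.index?_isSome_iff _ _).mp (by rw [h]; rfl)
        rcases List.mem_append.mp hm with h' | h'
        · exact absurd h' hp
        · simpa using h'
      subst hty
      rw [PySem.List.index?_append_singleton_self p t hp] at h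
      have hk : k = p.length := by injection h with h'; omega
      subst hk
      have htake : (p ++ [t]).take p.length = p := by simp
      rw [htake, PySem.Set.ofList_append_singleton,
          PySem.Set.add_of_not_mem (fun hm => hp ((PySem.Set.mem_ofList p t).mp hm)),
          pvTagged_append]
      simp [pvTagged]

-- dict membership in the tagged-dedup dict is list membership
theorem pvContains_tagged (ds : List String) (t : String) :
    (PySem.Dict.mk (pvTagged ds 0)).contains t = decide (t ∈ ds) := by
  rw [PySem.Dict.contains_eq_decide_mem_keys]
  simp [PySem.Dict.keys, pvMap_fst_tagged]

-- B's dict-comprehension loop over the suffix r, started from the tagged dedup of the prefix p,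
-- ends in the tagged dedup of p ++ r
theorem pvBInvariant (r p : List String) :
    r.foldl (fun d t => d.insert t (pvBVal (p ++ r) t)) (PySem.Dict.mk (pvTagged (PySem.Set.ofList p) 0))
      = PySem.Dict.mk (pvTagged (PySem.Set.ofList (p ++ r)) 0) := by
  induction r generalizing p with
  | nil => simp
  | cons t r' ih =>
    have hseq : p ++ t :: r' = (p ++ [t]) ++ r' := by simp
    by_cases hp : t ∈ p
    · -- t already has an id: index points into p, the insert overwrites with the same pair
      obtain ⟨k, hk⟩ := Option.isSome_iff_exists.mp ((PySem.List.index?_isSome_iff p t).mpr hp)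
      have hidx : PySem.List.index? (p ++ t :: r') t = some k := by
        rw [PySem.List.index?_append_of_mem (t :: r') hp]; exact hk
      obtain ⟨hklt, -, -⟩ := PySem.List.getElem_of_index?_eq_some hk
      have hval : pvBVal (p ++ t :: r') t = ((PySem.Set.ofList (p.take k)).length : Int) := by
        unfold pvBVal
        rw [hidx]
        simp only [Option.getD_some, PySem.List.slice_to_natCast,
          List.take_append_of_le_length (le_of_lt hklt)]
      have hcon : (PySem.Dict.mk (pvTagged (PySem.Set.ofList p) 0)).contains t = true := by
        rw [pvContains_tagged]; simp [PySem.Set.mem_ofList, hp]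
      have hins : (PySem.Dict.mk (pvTagged (PySem.Set.ofList p) 0)).insert t (pvBVal (p ++ t :: r') t)
          = PySem.Dict.mk (pvTagged (PySem.Set.ofList p) 0) := by
        apply PySem.Dict.ext
        rw [PySem.Dict.items_insert_of_contains _ _ hcon]
        show (pvTagged (PySem.Set.ofList p) 0).map _ = _
        rw [hval]
        exact pvReplace_mem _ _ _ _ (PySem.Set.nodup_ofList p)
          (pvVal_mem_tagged p t k hk)
      have hof : PySem.Set.ofList (p ++ [t]) = PySem.Set.ofList p := by
        rw [PySem.Set.ofList_append_singleton,
            PySem.Set.add_of_mem ((PySem.Set.mem_ofList p t).mpr hp)]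
      calc (t :: r').foldl (fun d t' => d.insert t' (pvBVal (p ++ t :: r') t'))
              (PySem.Dict.mk (pvTagged (PySem.Set.ofList p) 0))
          = r'.foldl (fun d t' => d.insert t' (pvBVal ((p ++ [t]) ++ r') t'))
              (PySem.Dict.mk (pvTagged (PySem.Set.ofList (p ++ [t])) 0)) := by
            rw [List.foldl_cons, hins, hof, hseq]
        _ = PySem.Dict.mk (pvTagged (PySem.Set.ofList ((p ++ [t]) ++ r')) 0) := ih (p ++ [t])
        _ = PySem.Dict.mk (pvTagged (PySem.Set.ofList (p ++ t :: r')) 0) := by rw [← hseq]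
    · -- fresh tag: its first occurrence is at position p.length, id = distinct count of p
      have hidx : PySem.List.index? (p ++ t :: r') t = some p.length := by
        rw [PySem.List.index?_eq_some_iff]
        exact ⟨p, r', rfl, rfl, hp⟩
      have hval : pvBVal (p ++ t :: r') t = ((PySem.Set.ofList p).length : Int) := by
        unfold pvBVal
        rw [hidx]
        simp only [Option.getD_some, PySem.List.slice_to_natCast]
        simp
      have hcon : (PySem.Dict.mk (pvTagged (PySem.Set.ofList p) 0)).contains t = false := by
        rw [pvContains_tagged]; simp [PySem.Set.mem_ofList, hp]
      have hof : PySem.Set.ofList (p ++ [t]) = PySem.Set.ofList p ++ [t] := by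
        rw [PySem.Set.ofList_append_singleton,
            PySem.Set.add_of_not_mem (fun hm => hp ((PySem.Set.mem_ofList p t).mp hm))]
      have hins : (PySem.Dict.mk (pvTagged (PySem.Set.ofList p) 0)).insert t (pvBVal (p ++ t :: r') t)
          = PySem.Dict.mk (pvTagged (PySem.Set.ofList (p ++ [t])) 0) := by
        apply PySem.Dict.ext
        rw [PySem.Dict.items_insert_of_not_contains _ _ hcon]
        show pvTagged (PySem.Set.ofList p) 0 ++ [(t, pvBVal (p ++ t :: r') t)] = _
        rw [hval, hof, pvTagged_append]
        simp [pvTagged]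
      calc (t :: r').foldl (fun d t' => d.insert t' (pvBVal (p ++ t :: r') t'))
              (PySem.Dict.mk (pvTagged (PySem.Set.ofList p) 0))
          = r'.foldl (fun d t' => d.insert t' (pvBVal ((p ++ [t]) ++ r') t'))
              (PySem.Dict.mk (pvTagged (PySem.Set.ofList (p ++ [t])) 0)) := by
            rw [List.foldl_cons, hins, hseq]
        _ = PySem.Dict.mk (pvTagged (PySem.Set.ofList ((p ++ [t]) ++ r')) 0) := ih (p ++ [t])
        _ = PySem.Dict.mk (pvTagged (PySem.Set.ofList (p ++ t :: r')) 0) := by rw [← hseq]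

-- items of the two ports, both characterised as the tagged first-occurrence dedup
theorem pvA_items (tags_1 tags_2 : List String) :
    get_dico_of_tags tags_1 tags_2 = pvTagged (PySem.Set.ofList (tags_1 ++ tags_2)) 0 := by
  unfold get_dico_of_tags
  show (List.foldl pvAStep (List.foldl pvAStep (PySem.Dict.empty, 0) tags_1) tags_2).1.items = _
  have h0 : (PySem.Dict.empty, (0 : Int))
      = (PySem.Dict.mk (pvTagged ([] : PySem.Set String) 0), ((([] : PySem.Set String)).length : Int)) := rfl
  rw [h0, ← List.foldl_append, pvAInvariant, ← PySem.Set.ofList_eq_foldl]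

theorem pvB_items (tags_1 tags_2 : List String) :
    get_dico_of_tags_alt tags_1 tags_2 = pvTagged (PySem.Set.ofList (tags_1 ++ tags_2)) 0 := by
  unfold get_dico_of_tags_alt
  show ((tags_1 ++ tags_2).foldl (fun d t => d.insert t (pvBVal (tags_1 ++ tags_2) t))
      PySem.Dict.empty).items = _
  have h := pvBInvariant (tags_1 ++ tags_2) []
  simp only [List.nil_append] at h
  rw [show PySem.Dict.empty
        = PySem.Dict.mk (pvTagged (PySem.Set.ofList ([] : List String)) 0) from rfl, h]

-- ===== VERDICT (by name: the statement is the Claim_ definition above) =====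
theorem get_dico_of_tags_spec : Claim_equal_get_dico_of_tags := by
  intro tags_1 tags_2 _
  unfold Spec_get_dico_of_tags
  rw [pvA_items, pvB_items]
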